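-- pv_equiv track=rewrite | github.com/RenoirTan/AdventOfCode2021 | days/3/code/p2.py | split_numbers
-- ===== SOURCE A (Python) =====
-- import typing as t
--
-- def bit_at(number: int, bit_index: int) -> int:
--     return (number >> bit_index) & 1
--
-- def most_common_bit(numbers: t.List[int], bit_index: int) -> int:
--     ones = sum(map(lambda number: bit_at(number, bit_index), numbers))
--     n_nums = len(numbers)
--     zeroes = n_nums - ones
--     return int(ones >= zeroes)
--
-- def split_numbers(numbers: t.List[int], bit_index: int) -> t.Tuple[t.List[int], t.List[int]]:
--     mcbit = most_common_bit(numbers, bit_index)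
--     # numbers with most common bit
--     most = []
--     least = []
--     for number in numbers:
--         if bit_at(number, bit_index) == mcbit:
--             most.append(number)
--         else:
--             least.append(number)
--     return most, least
-- ===== SOURCE B (Python) =====
-- def split_numbers(numbers, bit_index):
--     ones = []
--     zeros = []
--     for number in numbers:
--         if (number >> bit_index) & 1:
--             ones.append(number)
--         else:
--             zeros.append(number)
--     return (ones, zeros) if len(ones) >= len(zeros) else (zeros, ones)
-- ===== Notes on version B (the rewrite author's own statement) =====
-- stated objective: simpler
-- what changed: B buckets the numbers into ones/zeros in a single pass and decides the output order by comparing bucket sizes, eliminating A's separate bit-summing pass (most_common_bit) and the per-element mcbit comparison.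
import Mathlib
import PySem

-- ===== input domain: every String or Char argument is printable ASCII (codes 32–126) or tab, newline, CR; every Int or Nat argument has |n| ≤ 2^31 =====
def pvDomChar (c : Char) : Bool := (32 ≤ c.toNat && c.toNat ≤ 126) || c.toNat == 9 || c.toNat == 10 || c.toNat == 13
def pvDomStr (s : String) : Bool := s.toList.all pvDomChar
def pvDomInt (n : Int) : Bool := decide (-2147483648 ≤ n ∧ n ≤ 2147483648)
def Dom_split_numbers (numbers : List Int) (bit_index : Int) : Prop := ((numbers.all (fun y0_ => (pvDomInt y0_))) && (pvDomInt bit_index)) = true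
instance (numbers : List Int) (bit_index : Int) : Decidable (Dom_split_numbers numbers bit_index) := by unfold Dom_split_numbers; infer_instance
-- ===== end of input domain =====

-- ===== PORT A =====
-- B differs from A by a single-pass bucket split; proved equal on bit_index ≥ 0 (Python raises on negative shifts).
def bit_at (number : Int) (bit_index : Int) : Int :=
  PySem.Int.band (number >>> bit_index.toNat) 1

def most_common_bit (numbers : List Int) (bit_index : Int) : Int :=
  let ones : Int := (numbers.map (fun number => bit_at number bit_index)).sum
  let n_nums : Int := (numbers.length : Int)
  let zeroes : Int := n_nums - ones
  if ones ≥ zeroes then 1 else 0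

def split_numbers (numbers : List Int) (bit_index : Int) : List Int × List Int :=
  let mcbit := most_common_bit numbers bit_index
  let r := numbers.foldl
    (fun (acc : List Int × List Int) number =>
      if bit_at number bit_index = mcbit then (acc.1 ++ [number], acc.2)
      else (acc.1, acc.2 ++ [number]))
    ([], [])
  (r.1, r.2)

-- ===== PORT B =====
-- single pass, bucketing by the bit's truthiness; order decided by bucket sizes
def altLoop (bit_index : Int) : List Int → List Int → List Int → List Int × List Int
  | [], ones, zeros => (ones, zeros)
  | number :: rest, ones, zeros =>
      if PySem.Int.band (number >>> bit_index.toNat) 1 ≠ 0 then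
        altLoop bit_index rest (ones ++ [number]) zeros
      else
        altLoop bit_index rest ones (zeros ++ [number])

def split_numbers_alt (numbers : List Int) (bit_index : Int) : List Int × List Int :=
  let r := altLoop bit_index numbers [] []
  if r.2.length ≤ r.1.length then (r.1, r.2) else (r.2, r.1)

-- ===== PRECONDITION & SPEC =====
-- Python `>>` raises ValueError for a negative shift count (in both A and B), so negative
-- bit_index is excluded except when numbers is empty (no shift is ever evaluated there).
def Pre_split_numbers (numbers : List Int) (bit_index : Int) : Prop := 0 ≤ bit_index ∨ numbers = []
instance (numbers : List Int) (bit_index : Int) : Decidable (Pre_split_numbers numbers bit_index) := by unfold Pre_split_numbers; infer_instance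
def pvWitness_split_numbers : List Int × Int := ([5, 2, 7], 1)

def Spec_split_numbers (numbers : List Int) (bit_index : Int) (out : List Int × List Int) : Prop := out = split_numbers_alt numbers bit_index
instance (numbers : List Int) (bit_index : Int) (out : List Int × List Int) : Decidable (Spec_split_numbers numbers bit_index out) := by unfold Spec_split_numbers; infer_instance

-- ===== CLAIM (what is proved, stated in full; the proofs are below) =====
def Claim_equal_split_numbers : Prop := ∀ (numbers : List Int) (bit_index : Int), Dom_split_numbers numbers bit_index → Pre_split_numbers numbers bit_index → Spec_split_numbers numbers bit_index (split_numbers numbers bit_index)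

-- ===== LEMMAS AND PROOFS =====

theorem bit_at_01 (n bi : Int) : bit_at n bi = 0 ∨ bit_at n bi = 1 := by
  unfold bit_at
  rw [PySem.Int.band_one]
  have h1 := PySem.Int.mod_nonneg (n >>> bi.toNat) (b := 2) (by omega)
  have h2 := PySem.Int.mod_lt (n >>> bi.toNat) (b := 2) (by omega)
  omega

theorem altLoop_eq (bi : Int) (l ones zeros : List Int) :
    altLoop bi l ones zeros =
      (ones ++ l.filter (fun n => bit_at n bi = 1),
       zeros ++ l.filter (fun n => ¬ bit_at n bi = 1)) := by
  induction l generalizing ones zeros with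
  | nil => simp [altLoop]
  | cons x xs ih =>
    have hx := bit_at_01 x bi
    by_cases h : bit_at x bi = 1
    · have hcond : PySem.Int.band (x >>> bi.toNat) 1 ≠ 0 := by
        unfold bit_at at h; omega
      simp [altLoop, hcond, ih, h]
    · have h0 : bit_at x bi = 0 := by rcases hx with h0 | h1 <;> simp_all
      have hcond : ¬ PySem.Int.band (x >>> bi.toNat) 1 ≠ 0 := by
        unfold bit_at at h0; omega
      simp [altLoop, hcond, ih, h]

theorem foldlA_eq (bi mc : Int) (l m lst : List Int) :
    l.foldl
      (fun (acc : List Int × List Int) number =>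
        if bit_at number bi = mc then (acc.1 ++ [number], acc.2)
        else (acc.1, acc.2 ++ [number]))
      (m, lst) =
      (m ++ l.filter (fun n => bit_at n bi = mc),
       lst ++ l.filter (fun n => ¬ bit_at n bi = mc)) := by
  induction l generalizing m lst with
  | nil => simp
  | cons x xs ih =>
    by_cases h : bit_at x bi = mc <;> simp [h, ih]

theorem sum_bits_eq (bi : Int) (l : List Int) :
    (l.map (fun n => bit_at n bi)).sum =
      ((l.filter (fun n => bit_at n bi = 1)).length : Int) := by
  induction l with
  | nil => simp
  | cons x xs ih =>
    rcases bit_at_01 x bi with h | h <;> simp [h, ih] <;> omega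

theorem filter_len_split (bi : Int) (l : List Int) :
    (l.filter (fun n => bit_at n bi = 1)).length +
      (l.filter (fun n => ¬ bit_at n bi = 1)).length = l.length := by
  induction l with
  | nil => simp
  | cons x xs ih =>
    simp only [List.filter_cons, decide_not] at *
    by_cases h : bit_at x bi = 1 <;> simp [h] <;> omega

theorem filter_zero_eq (bi : Int) (l : List Int) :
    l.filter (fun n => decide (bit_at n bi = 0)) = l.filter (fun n => !decide (bit_at n bi = 1)) := by
  apply List.filter_congr
  intro x _
  rcases bit_at_01 x bi with h | h <;> simp [h]

theorem filter_ne_zero_eq (bi : Int) (l : List Int) :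
    l.filter (fun n => !decide (bit_at n bi = 0)) = l.filter (fun n => decide (bit_at n bi = 1)) := by
  apply List.filter_congr
  intro x _
  rcases bit_at_01 x bi with h | h <;> simp [h]

-- ===== VERDICT (by name: the statement is the Claim_ definition above) =====
theorem split_numbers_spec : Claim_equal_split_numbers := by
  intro numbers bi _ _
  unfold Spec_split_numbers split_numbers split_numbers_alt most_common_bit
  simp only [altLoop_eq, foldlA_eq, sum_bits_eq, List.nil_append]
  have hsplit := filter_len_split bi numbers
  set k1 := (numbers.filter (fun n => bit_at n bi = 1)).length with hk1
  set k0 := (numbers.filter (fun n => ¬ bit_at n bi = 1)).length with hk0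
  by_cases h : (k1 : Int) ≥ (numbers.length : Int) - (k1 : Int)
  · have hb : k0 ≤ k1 := by omega
    simp [h, hb]
  · have hb : ¬ k0 ≤ k1 := by omega
    rw [if_neg h, if_neg hb]
    simp [decide_not, filter_zero_eq, filter_ne_zero_eq]
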